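-- pv_equiv track=rewrite | github.com/sindux/cp | gcj/2022/q1.py | go
-- ===== SOURCE A (Python) =====
-- def go(r,c):
--     ans=[]
--     l=['..+'] + ['-+'] * (c-1)
--     ans.append(''.join(l))
--     for rr in range(r):
--         l=['..|' if rr==0 else '|.|'] + ['.|'] * (c-1)
--         ans.append(''.join(l))
--
--         l=['+'] + ['-+'] * c
--         ans.append(''.join(l))
--     return '\n'.join(ans)
-- ===== SOURCE B (Python) =====
-- def grid_line(i, c):
--     if i % 2 == 0:
--         return '+' + '-+' * c
--     return '|' + '.|' * c
--
-- def go(r, c):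
--     n = 2 * max(r, 0) + 1
--     lines = [grid_line(i, c) for i in range(n)]
--     for i in range(min(2, n)):
--         lines[i] = '..' + grid_line(i, c - 1)
--     return '\n'.join(lines)
-- ===== Notes on version B (the rewrite author's own statement) =====
-- stated objective: simpler
-- what changed: B replaces A's inline-branching append loop by building the uniform (2*max(r,0)+1)-line grid from one parity-indexed line formula and then patching only the first two lines (the '..' corner) as '..' plus the line one cell narrower.
-- intended difference: For r >= 2 and c <= 0 (a degenerate zero-column grid) A returns middle rows '|.|' carrying one spurious cell while its header and separators have zero cells; B returns the consistent zero-cell row '|', which is the intended uniform grid. — e.g. on go(2, 0): A returns "..+\n..|\n+\n|.|\n+", B returns "..+\n..|\n+\n|\n+"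
import Mathlib
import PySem

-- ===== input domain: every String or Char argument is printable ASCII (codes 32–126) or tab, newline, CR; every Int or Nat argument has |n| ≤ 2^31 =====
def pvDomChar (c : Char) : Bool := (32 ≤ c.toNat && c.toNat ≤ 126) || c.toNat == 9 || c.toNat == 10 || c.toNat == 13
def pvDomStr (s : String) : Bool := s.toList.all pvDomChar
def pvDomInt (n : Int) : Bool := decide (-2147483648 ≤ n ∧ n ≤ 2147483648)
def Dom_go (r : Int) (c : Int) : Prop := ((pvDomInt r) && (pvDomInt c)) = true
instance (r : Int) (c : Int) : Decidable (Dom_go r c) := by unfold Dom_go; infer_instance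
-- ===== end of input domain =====

-- B builds the uniform grid from one parity-indexed line formula and patches the '..' corner
-- afterwards, instead of A's loop that branches inline while appending; return values only, no
-- argument is mutated. On r ≥ 2 ∧ c ≤ 0 the two differ (see D_go below).

-- ===== PORT A =====
-- Python list repetition ['x'] * n (empty for n ≤ 0) is PySem.List.pyRepeat; ''.join / '\n'.join
-- are PySem.Str.join.
def go (r : Int) (c : Int) : String :=
  let ans : List String := []
  -- l = ['..+'] + ['-+'] * (c-1); ans.append(''.join(l))
  let ans := ans ++ [PySem.Str.join "" (["..+"] ++ PySem.List.pyRepeat ["-+"] (c - 1))]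
  -- for rr in range(r): append the cell row, then the separator row
  let ans := (PySem.List.pyRange 0 r 1).foldl (fun ans rr =>
    let ans := ans ++
      [PySem.Str.join "" ([if rr == 0 then "..|" else "|.|"] ++ PySem.List.pyRepeat [".|"] (c - 1))]
    ans ++ [PySem.Str.join "" (["+"] ++ PySem.List.pyRepeat ["-+"] c)]) ans
  PySem.Str.join "\n" ans

-- ===== PORT B =====
-- Python string repetition and concatenation '+' + '-+'*c is ported exactly as ''.join of the
-- pieces, with the repeated piece as PySem.List.pyRepeat (empty for c ≤ 0, like Python).
def gridLine (i : Int) (c : Int) : String :=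
  if PySem.Int.mod i 2 == 0 then PySem.Str.join "" (["+"] ++ PySem.List.pyRepeat ["-+"] c)
  else PySem.Str.join "" (["|"] ++ PySem.List.pyRepeat [".|"] c)

-- lines[i] = … with i ∈ range(min 2 n), 0 ≤ i < n = lines length: List.set i.toNat is exact here.
def go_alt (r : Int) (c : Int) : String :=
  let n : Int := 2 * max r 0 + 1
  let lines := (PySem.List.pyRange 0 n 1).map (fun i => gridLine i c)
  let lines := (PySem.List.pyRange 0 (min 2 n) 1).foldl (fun ls i =>
    ls.set i.toNat (PySem.Str.join "" ["..", gridLine i (c - 1)])) lines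
  PySem.Str.join "\n" lines

-- ===== PRECONDITION & SPEC =====
-- For r ≥ 2 and c ≤ 0 (a degenerate zero-column grid) A returns middle rows '|.|' carrying one
-- spurious cell while its header and separators have zero cells; B returns the consistent
-- zero-cell row '|', which is the intended uniform grid.
def D_go (r : Int) (c : Int) : Prop := 2 ≤ r ∧ c ≤ 0
instance (r : Int) (c : Int) : Decidable (D_go r c) := by unfold D_go; infer_instance

def Spec_go (r : Int) (c : Int) (out : String) : Prop := ¬ D_go r c → out = go_alt r c
instance (r : Int) (c : Int) (out : String) : Decidable (Spec_go r c out) := by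
  unfold Spec_go; infer_instance

def pvDiffWitness_go : Int × Int := (2, 0)
def pvDiffWitnessOut_go : String × String := ("..+\n..|\n+\n|.|\n+", "..+\n..|\n+\n|\n+")

-- ===== CLAIM (what is proved, stated in full; the proofs are below) =====
def Claim_unchanged_go : Prop := ∀ (r : Int) (c : Int), Dom_go r c → Spec_go r c (go r c)
def Claim_changed_go : Prop := Dom_go (pvDiffWitness_go.1) (pvDiffWitness_go.2) ∧ D_go (pvDiffWitness_go.1) (pvDiffWitness_go.2) ∧ go (pvDiffWitness_go.1) (pvDiffWitness_go.2) = pvDiffWitnessOut_go.1 ∧ go_alt (pvDiffWitness_go.1) (pvDiffWitness_go.2) = pvDiffWitnessOut_go.2 ∧ pvDiffWitnessOut_go.1 ≠ pvDiffWitnessOut_go.2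
def Claim_exact_go : Prop := ∀ (r : Int) (c : Int), Dom_go r c → D_go r c → go r c ≠ go_alt r c

-- ===== LEMMAS AND PROOFS =====

-- the five kinds of lines the two programs produce
def topS (c : Int) : String := PySem.Str.join "" (["..+"] ++ PySem.List.pyRepeat ["-+"] (c - 1))
def row0S (c : Int) : String := PySem.Str.join "" (["..|"] ++ PySem.List.pyRepeat [".|"] (c - 1))
def rowS (c : Int) : String := PySem.Str.join "" (["|.|"] ++ PySem.List.pyRepeat [".|"] (c - 1))
def sepS (c : Int) : String := PySem.Str.join "" (["+"] ++ PySem.List.pyRepeat ["-+"] c)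
def cellS (c : Int) : String := PySem.Str.join "" (["|"] ++ PySem.List.pyRepeat [".|"] c)

-- A's line list for r = k, and B's middle section (k repetitions of cell row + separator)
def ansA : Nat → Int → List String
  | 0, c => [topS c]
  | k + 1, c => ansA k c ++ [if k = 0 then row0S c else rowS c, sepS c]

def midA : Nat → Int → List String
  | 0, _ => []
  | k + 1, c => rowS c :: sepS c :: midA k c

def midB : Nat → Int → List String
  | 0, _ => []
  | k + 1, c => cellS c :: sepS c :: midB k c

lemma join_empty_sep (ls : List (List Char)) : PySem.Chars.join [] ls = ls.flatten := by
  induction ls with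
  | nil => simp [PySem.Chars.join_nil]
  | cons p rest ih =>
    cases rest with
    | nil => simp [PySem.Chars.join_singleton]
    | cons q r => simp [PySem.Chars.join_cons_cons, ih]

lemma toList_join_empty (parts : List String) :
    (PySem.Str.join "" parts).toList = (parts.map String.toList).flatten := by
  rw [PySem.Str.toList_join, show ("".toList) = ([] : List Char) from rfl, join_empty_sep]

-- the two parities of gridLine
lemma gridLine_even (k : Nat) (c : Int) : gridLine (2 * (k : Int)) c = sepS c := by
  rw [gridLine, if_pos (by simp)]
  rfl

lemma gridLine_odd (k : Nat) (c : Int) : gridLine (2 * (k : Int) + 1) c = cellS c := by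
  rw [gridLine, if_neg (by simp)]
  rfl

lemma patch0_eq (c : Int) : PySem.Str.join "" ["..", gridLine 0 (c - 1)] = topS c := by
  have hg : gridLine 0 (c - 1) = sepS (c - 1) := by simpa using gridLine_even 0 (c - 1)
  rw [hg]
  apply String.toList_inj.mp
  simp [sepS, topS, join_empty_sep, PySem.List.pyRepeat_singleton]

lemma patch1_eq (c : Int) : PySem.Str.join "" ["..", gridLine 1 (c - 1)] = row0S c := by
  have hg : gridLine 1 (c - 1) = cellS (c - 1) := by simpa using gridLine_odd 0 (c - 1)
  rw [hg]
  apply String.toList_inj.mp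
  simp [cellS, row0S, join_empty_sep, PySem.List.pyRepeat_singleton]

lemma cellS_eq_rowS {c : Int} (hc : 1 ≤ c) : cellS c = rowS c := by
  apply String.toList_inj.mp
  have h : c.toNat = (c - 1).toNat + 1 := by omega
  rw [cellS, rowS]
  simp only [toList_join_empty, PySem.List.pyRepeat_singleton, List.map_append, List.map_cons,
    List.map_nil, List.map_replicate, h, List.replicate_succ]
  simp

lemma midA_eq_midB {c : Int} (hc : 1 ≤ c) (k : Nat) : midA k c = midB k c := by
  induction k with
  | zero => rfl
  | succ k ih => simp [midA, midB, ih, cellS_eq_rowS hc]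

lemma midB_snoc (k : Nat) (c : Int) :
    midB k c ++ [cellS c, sepS c] = cellS c :: sepS c :: midB k c := by
  induction k with
  | zero => rfl
  | succ k ih => simp [midB] at ih ⊢; simpa using ih

lemma midA_snoc (k : Nat) (c : Int) :
    midA k c ++ [rowS c, sepS c] = rowS c :: sepS c :: midA k c := by
  induction k with
  | zero => rfl
  | succ k ih => simp [midA] at ih ⊢; simpa using ih

-- A's fold produces ansA
lemma goA_eq (k : Nat) (c : Int) : go (k : Int) c = PySem.Str.join "\n" (ansA k c) := by
  suffices h : ∀ (m : Nat),
      (PySem.List.pyRange 0 (m : Int) 1).foldl (fun ans rr =>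
        (ans ++
          [PySem.Str.join "" ([if rr == 0 then "..|" else "|.|"] ++
            PySem.List.pyRepeat [".|"] (c - 1))]) ++
        [PySem.Str.join "" (["+"] ++ PySem.List.pyRepeat ["-+"] c)]) [topS c] = ansA m c by
    show PySem.Str.join "\n"
      ((PySem.List.pyRange 0 ((k : Nat) : Int) 1).foldl (fun ans rr =>
        (ans ++
          [PySem.Str.join "" ([if rr == 0 then "..|" else "|.|"] ++
            PySem.List.pyRepeat [".|"] (c - 1))]) ++
        [PySem.Str.join "" (["+"] ++ PySem.List.pyRepeat ["-+"] c)]) [topS c]) =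
      PySem.Str.join "\n" (ansA k c)
    exact congrArg _ (h k)
  intro m
  induction m with
  | zero => simp [PySem.List.pyRange_one_eq_nil (by omega : (0:Int) ≤ 0), ansA]
  | succ m ih =>
    have hsplit : PySem.List.pyRange 0 ((m : Int) + 1) 1 =
        PySem.List.pyRange 0 (m : Int) 1 ++ [(m : Int)] :=
      PySem.List.pyRange_one_succ_right (by positivity)
    have hcast : ((m + 1 : Nat) : Int) = (m : Int) + 1 := by push_cast; ring
    rw [hcast, hsplit, List.foldl_append, ih]
    by_cases hm : m = 0
    · subst hm; simp [ansA, row0S, sepS]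
    · simp [ansA, hm, rowS, sepS]

lemma ansA_succ_eq (k : Nat) (c : Int) :
    ansA (k + 1) c = topS c :: row0S c :: sepS c :: midA k c := by
  induction k with
  | zero => rfl
  | succ k ih =>
    have hk : ¬ (k + 1 = 0) := by omega
    calc ansA (k + 2) c = ansA (k + 1) c ++ [rowS c, sepS c] := by simp [ansA]
    _ = topS c :: row0S c :: sepS c :: (midA k c ++ [rowS c, sepS c]) := by simp [ih]
    _ = topS c :: row0S c :: sepS c :: midA (k + 1) c := by rw [midA_snoc]; rfl

-- B's uniform line list
lemma mapB (k : Nat) (c : Int) :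
    (PySem.List.pyRange 0 (2 * (k : Int) + 1) 1).map (fun i => gridLine i c) =
      sepS c :: midB k c := by
  induction k with
  | zero =>
    have h1 : (2 * ((0 : Nat) : Int) + 1) = (0 : Int) + 1 := by norm_num
    have h2 := gridLine_even 0 c
    norm_num at h2
    rw [h1, PySem.List.pyRange_one_singleton]
    simp [midB, h2]
  | succ k ih =>
    have h1 : PySem.List.pyRange 0 (2 * ((k : Int) + 1) + 1) 1 =
        PySem.List.pyRange 0 (2 * (k : Int) + 2) 1 ++ [2 * (k : Int) + 2] := by
      have := PySem.List.pyRange_one_succ_right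
        (a := 0) (b := 2 * (k : Int) + 2) (by omega)
      rw [← this]; ring_nf
    have h2 : PySem.List.pyRange 0 (2 * (k : Int) + 2) 1 =
        PySem.List.pyRange 0 (2 * (k : Int) + 1) 1 ++ [2 * (k : Int) + 1] := by
      have := PySem.List.pyRange_one_succ_right
        (a := 0) (b := 2 * (k : Int) + 1) (by omega)
      rw [← this]; ring_nf
    have hodd := gridLine_odd k c
    have heven : gridLine (2 * (k : Int) + 2) c = sepS c := by
      have := gridLine_even (k + 1) c
      have hc : (2 : Int) * ((k + 1 : Nat) : Int) = 2 * (k : Int) + 2 := by push_cast; ring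
      rwa [hc] at this
    have hcast : ((k + 1 : Nat) : Int) = (k : Int) + 1 := by push_cast; ring
    rw [hcast, h1, h2]
    simp only [List.map_append, ih, List.map_cons, List.map_nil, hodd, heven]
    rw [List.append_assoc]
    simp [midB_snoc, midB]

-- B's result for r = k
lemma goB_eq_zero (c : Int) {r : Int} (hr : r ≤ 0) :
    go_alt r c = PySem.Str.join "\n" [topS c] := by
  have hmax : max r 0 = 0 := by omega
  have hr1 : PySem.List.pyRange 0 (2 * (0:Int) + 1) 1 = [(0 : Int)] := by
    simpa using PySem.List.pyRange_one_singleton 0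
  have hmin : min (2 : Int) (2 * (0:Int) + 1) = 1 := by omega
  have hpr : PySem.List.pyRange 0 (1 : Int) 1 = [(0 : Int)] := by
    simpa using PySem.List.pyRange_one_singleton 0
  simp only [go_alt, hmax, hmin, hr1, hpr, List.map_cons, List.map_nil, List.foldl_cons,
    List.foldl_nil]
  have h2 := gridLine_even 0 c
  norm_num at h2
  rw [h2]
  show PySem.Str.join "\n" [PySem.Str.join "" ["..", gridLine 0 (c - 1)]] = _
  rw [patch0_eq c]

lemma goB_eq_pos (k : Nat) (c : Int) :
    go_alt ((k : Int) + 1) c =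
      PySem.Str.join "\n" (topS c :: row0S c :: sepS c :: midB k c) := by
  have hmax : max ((k : Int) + 1) 0 = (k : Int) + 1 := by omega
  have hmin : min (2 : Int) (2 * ((k : Int) + 1) + 1) = 2 := by omega
  have hmap : (PySem.List.pyRange 0 (2 * ((k : Int) + 1) + 1) 1).map (fun i => gridLine i c) =
      sepS c :: cellS c :: sepS c :: midB k c := by
    have := mapB (k + 1) c
    have hc : (2 : Int) * ((k + 1 : Nat) : Int) + 1 = 2 * ((k : Int) + 1) + 1 := by
      push_cast; ring
    rw [hc] at this
    simpa [midB] using this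
  have hpr2 : PySem.List.pyRange 0 (2 : Int) 1 = [(0 : Int), 1] := by
    have h1 : PySem.List.pyRange 0 (2 : Int) 1 = PySem.List.pyRange 0 1 1 ++ [1] := by
      have := PySem.List.pyRange_one_succ_right (a := (0:Int)) (b := 1) (by omega)
      simpa using this
    have h0 : PySem.List.pyRange 0 (1 : Int) 1 = [(0 : Int)] := by
      simpa using PySem.List.pyRange_one_singleton 0
    rw [h1, h0]; rfl
  simp only [go_alt, hmax, hmin, hmap, hpr2]
  simp [List.foldl, List.set, patch0_eq c, patch1_eq c]

-- A's result for r ≤ 0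
lemma goA_eq_zero (c : Int) {r : Int} (hr : r ≤ 0) :
    go r c = PySem.Str.join "\n" [topS c] := by
  simp [go, PySem.List.pyRange_one_eq_nil hr, topS]

-- lengths, for the tightness proof (c ≤ 0 makes every line literal)
lemma len_join_nl (p : List Char) (ls : List (List Char)) :
    (PySem.Chars.join ['\n'] (p :: ls)).length =
      p.length + (ls.map (fun q => q.length + 1)).sum := by
  induction ls generalizing p with
  | nil => simp [PySem.Chars.join_singleton]
  | cons q rest ih =>
    rw [PySem.Chars.join_cons_cons]
    simp only [List.length_append, List.map_cons, List.sum_cons]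
    rw [ih q]
    simp
    omega

lemma midA_len_neg {c : Int} (hc : c ≤ 0) (k : Nat) :
    ((midA k c).map ((fun q : List Char => q.length + 1) ∘ String.toList)).sum = 6 * k := by
  have hc1 : (c - 1).toNat = 0 := by omega
  induction k with
  | zero => simp [midA]
  | succ k ih =>
    simp only [midA, List.map_cons, List.sum_cons, ih]
    simp [rowS, sepS, PySem.Str.toList_join, PySem.List.pyRepeat_singleton,
      hc1, (by omega : c.toNat = 0)]
    omega

lemma midB_len_neg {c : Int} (hc : c ≤ 0) (k : Nat) :
    ((midB k c).map ((fun q : List Char => q.length + 1) ∘ String.toList)).sum = 4 * k := by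
  induction k with
  | zero => simp [midB]
  | succ k ih =>
    simp only [midB, List.map_cons, List.sum_cons, ih]
    simp [cellS, sepS, PySem.List.pyRepeat_singleton,
      (by omega : c.toNat = 0)]
    omega

-- ===== VERDICT (by name: the statement is the Claim_ definition above) =====
theorem go_spec : Claim_unchanged_go := by
  intro r c _ hD
  by_cases hr : r ≤ 0
  · rw [goA_eq_zero c hr, goB_eq_zero c hr]
  · -- r ≥ 1: write r = k + 1
    obtain ⟨k, hk⟩ : ∃ k : Nat, r = (k : Int) + 1 := ⟨(r - 1).toNat, by omega⟩
    have hA : go r c = PySem.Str.join "\n" (ansA (k + 1) c) := by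
      have := goA_eq (k + 1) c
      rwa [(by push_cast; ring : ((k + 1 : Nat) : Int) = (k : Int) + 1), ← hk] at this
    rw [hA, hk, goB_eq_pos k c, ansA_succ_eq]
    by_cases hk0 : k = 0
    · subst hk0; rfl
    · have hc : 1 ≤ c := by
        by_contra hcc
        exact hD ⟨by omega, by omega⟩
      rw [midA_eq_midB hc]

theorem go_changed : Claim_changed_go := by unfold Claim_changed_go; decide

theorem go_tight : Claim_exact_go := by
  intro r c _ hD hEq
  obtain ⟨hr, hc⟩ := hD
  obtain ⟨k, hk, hk1⟩ : ∃ k : Nat, r = (k : Int) + 1 ∧ 1 ≤ k := ⟨(r - 1).toNat, by omega, by omega⟩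
  have hA : go r c = PySem.Str.join "\n" (topS c :: row0S c :: sepS c :: midA k c) := by
    have h1 := goA_eq (k + 1) c
    rw [(by push_cast; ring : ((k + 1 : Nat) : Int) = (k : Int) + 1), ← hk, ansA_succ_eq] at h1
    exact h1
  have hB : go_alt r c = PySem.Str.join "\n" (topS c :: row0S c :: sepS c :: midB k c) := by
    rw [hk]; exact goB_eq_pos k c
  rw [hA, hB] at hEq
  have hLen := congrArg (fun s => s.toList.length) hEq
  have hconv : ∀ (ls : List String), (PySem.Str.join "\n" ls).toList =
      PySem.Chars.join ['\n'] (ls.map String.toList) := fun ls => PySem.Str.toList_join "\n" ls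
  simp only [hconv, List.map_cons] at hLen
  rw [len_join_nl, len_join_nl] at hLen
  simp only [List.map_cons, List.sum_cons, List.map_map] at hLen
  rw [midA_len_neg hc k, midB_len_neg hc k] at hLen
  omega
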